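-- pv_equiv track=rewrite | github.com/Hutaph/LAB02_Citation_Matching_and_Entity_Resolution | src/parse_util.py | legacy_order_child_parent
-- ===== SOURCE A (Python) =====
-- from collections import Counter, defaultdict
-- from typing import Dict, Iterable, List, Optional, Tuple
--
-- def legacy_order_child_parent(child_parent: Dict[str, str], root_id: str) -> Dict[str, str]:
--     parent_children: Dict[str, List[str]] = defaultdict(list)
--     for child, parent in child_parent.items():
--         parent_children[parent].append(child)
--     for v in parent_children.values():
--         v.sort()
--
--     ordered: List[tuple[str, str]] = []
--     seen: set = set()
--
--     queue: List[str] = [root_id]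
--     while queue:
--         parent = queue.pop(0)
--         for child in parent_children.get(parent, []):
--             ordered.append((child, parent))
--             if child not in seen:
--                 seen.add(child)
--                 queue.append(child)
--
--     for child, parent in sorted(child_parent.items(), key=lambda kv: (kv[1], kv[0])):
--         if child not in seen:
--             ordered.append((child, parent))
--
--     return dict(ordered)
-- ===== SOURCE B (Python) =====
-- def legacy_order_child_parent(child_parent, root_id):
--     # No BFS (no queue, frontier or seen-set) and no adjacency map: for every
--     # entry, walk its parent chain up to the root to get a (depth, path) key,
--     # then one global sort of those keys reproduces the traversal order.
--     n = len(child_parent)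
--
--     def key_of(node):
--         # Root-to-node list of chain nodes, or None when the chain never
--         # reaches the root (a walk of more than n steps must be cycling).
--         path = []
--         x = node
--         for _ in range(n + 1):
--             if x == root_id:
--                 path.reverse()
--                 return path
--             if x not in child_parent:
--                 return None
--             path.append(x)
--             x = child_parent[x]
--         return None
--
--     reach = []
--     rest = []
--     for child, parent in child_parent.items():
--         k = key_of(parent)
--         if k is None:
--             rest.append((parent, child))
--         else:
--             reach.append((len(k) + 1, tuple(k) + (child,), child, parent))
--     reach.sort()
--     out = {child: parent for _, _, child, parent in reach}
--     for parent, child in sorted(rest):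
--         out[child] = parent
--     return out
-- ===== Notes on version B (the rewrite author's own statement) =====
-- stated objective: alternative
-- what changed: B performs no traversal at all: instead of A's adjacency map, pop(0) BFS queue with a seen-set and final dict(ordered) dedup, B walks each entry's parent chain to compute a (depth, root-path) sort key and reconstructs A's BFS insertion order by one global sort of those keys, appending the unreachable entries sorted by (parent, child).
import Mathlib
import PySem

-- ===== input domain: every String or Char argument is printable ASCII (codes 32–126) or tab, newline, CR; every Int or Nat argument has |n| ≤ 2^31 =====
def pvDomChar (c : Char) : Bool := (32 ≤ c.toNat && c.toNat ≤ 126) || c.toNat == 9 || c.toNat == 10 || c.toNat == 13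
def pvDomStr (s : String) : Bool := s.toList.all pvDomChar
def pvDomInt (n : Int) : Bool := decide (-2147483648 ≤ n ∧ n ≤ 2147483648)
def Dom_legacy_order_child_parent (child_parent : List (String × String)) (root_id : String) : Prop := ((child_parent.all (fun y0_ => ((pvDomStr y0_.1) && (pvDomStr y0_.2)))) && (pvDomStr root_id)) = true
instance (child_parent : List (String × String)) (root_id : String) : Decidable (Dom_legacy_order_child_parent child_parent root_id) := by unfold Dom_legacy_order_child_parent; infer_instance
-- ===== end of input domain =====

-- B does no traversal at all: it walks each entry's parent chain to a (depth, root-path)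
-- sort key and rebuilds A's BFS insertion order by one global sort of those keys.

-- ===== PORT A =====
-- parent_children = defaultdict(list); for child, parent in child_parent.items(): parent_children[parent].append(child)
def pvAGroup (child_parent : List (String × String)) : PySem.Dict String (List String) :=
  child_parent.foldl (fun d cp => d.modify cp.2 [] (fun l => l ++ [cp.1])) PySem.Dict.empty

-- for v in parent_children.values(): v.sort()
def pvASortVals (d : PySem.Dict String (List String)) : PySem.Dict String (List String) :=
  PySem.Dict.mk (d.items.map (fun pv => (pv.1, PySem.List.sorted pv.2 (fun c => c) false)))

-- body of "for child in parent_children.get(parent, []): ordered.append…; if child not in seen: …"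
def pvAStep (pc : PySem.Dict String (List String)) (p : String)
    (st : List String × PySem.Set String × List (String × String)) :
    List String × PySem.Set String × List (String × String) :=
  (pc.getD p []).foldl (fun st c =>
    let o := st.2.2 ++ [(c, p)]
    if PySem.Set.contains st.2.1 c then (st.1, st.2.1, o)
    else (st.1 ++ [c], PySem.Set.add st.2.1 c, o)) st

-- "while queue: parent = queue.pop(0); …" — fuel-guarded; fuel 2*len+2 provably suffices (lemmas below)
def pvALoop (pc : PySem.Dict String (List String)) :
    Nat → List String → PySem.Set String → List (String × String) →
    PySem.Set String × List (String × String)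
  | 0, _, seen, ordered => (seen, ordered)
  | _ + 1, [], seen, ordered => (seen, ordered)
  | fuel + 1, p :: queue, seen, ordered =>
      let st := pvAStep pc p (queue, seen, ordered)
      pvALoop pc fuel st.1 st.2.1 st.2.2

def legacy_order_child_parent (child_parent : List (String × String)) (root_id : String) : List (String × String) :=
  let parent_children := pvASortVals (pvAGroup child_parent)
  let so := pvALoop parent_children (2 * child_parent.length + 2) [root_id] PySem.Set.empty []
  -- for child, parent in sorted(child_parent.items(), key=lambda kv: (kv[1], kv[0])): if child not in seen: ordered.append((child, parent))
  let ordered := (PySem.List.sorted2 child_parent (fun kv => kv.2) (fun kv => kv.1) false).foldl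
      (fun o kv => if PySem.Set.contains so.1 kv.1 then o else o ++ [kv]) so.2
  (PySem.Dict.ofList ordered).items       -- return dict(ordered)

-- ===== PORT B =====
-- def key_of(node): bounded walk up the parent chain (at most n+1 steps; a longer chain cycles)
def pvKeyOf (cpD : PySem.Dict String String) (root : String) :
    Nat → String → List String → Option (List String)
  | 0, _, _ => none                                     -- "return None  # cycle"
  | f + 1, x, path =>
      if x == root then some path.reverse               -- "path.reverse(); return path"
      else match cpD.get? x with
        | none => none                                  -- "if x not in child_parent: return None"
        | some p => pvKeyOf cpD root f p (path ++ [x])  -- "path.append(x); x = child_parent[x]"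

-- Python's default tuple comparison on (len(k)+1, tuple(k)+(child,), child, parent)
abbrev pvKeyT := Lex (Nat × Lex (List String × Lex (String × String)))
def pvKeyFn (e : Nat × List String × String × String) : pvKeyT :=
  toLex (e.1, toLex (e.2.1, toLex (e.2.2.1, e.2.2.2)))

-- loop body: append to `rest` when key_of(parent) is None, else to `reach`
def pvBSplit (cpD : PySem.Dict String String) (root : String) (n : Nat)
    (acc : List (Nat × List String × String × String) × List (String × String))
    (kv : String × String) :
    List (Nat × List String × String × String) × List (String × String) :=
  match pvKeyOf cpD root (n + 1) kv.2 [] with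
  | none => (acc.1, acc.2 ++ [(kv.2, kv.1)])
  | some k => (acc.1 ++ [(k.length + 1, k ++ [kv.1], kv.1, kv.2)], acc.2)

def legacy_order_child_parent_alt (child_parent : List (String × String)) (root_id : String) : List (String × String) :=
  let n := child_parent.length
  let cpD := PySem.Dict.ofList child_parent
  let rr := child_parent.foldl (pvBSplit cpD root_id n) ([], [])
  let reach := PySem.List.sorted rr.1 pvKeyFn false                     -- reach.sort()
  -- out = {child: parent for _, _, child, parent in reach}
  let out := reach.foldl (fun d e => d.insert e.2.2.1 e.2.2.2) PySem.Dict.empty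
  -- for parent, child in sorted(rest): out[child] = parent
  let out2 := (PySem.List.sorted rr.2 (fun q => toLex (q.1, q.2)) false).foldl
      (fun d q => d.insert q.2 q.1) out
  out2.items

-- ===== PRECONDITION & SPEC =====
-- Pre_ excludes association lists with a duplicated child key: the Python parameter is a dict,
-- whose keys are distinct, so such lists encode no Python input at all (A is never called on them).
def Pre_legacy_order_child_parent (child_parent : List (String × String)) (root_id : String) : Prop :=
  (child_parent.map Prod.fst).Nodup
instance (child_parent : List (String × String)) (root_id : String) : Decidable (Pre_legacy_order_child_parent child_parent root_id) := by unfold Pre_legacy_order_child_parent; infer_instance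

def pvWitness_legacy_order_child_parent : (List (String × String)) × String :=
  ([("b", "a"), ("c", "a"), ("d", "b"), ("e", "z")], "a")

def Spec_legacy_order_child_parent (child_parent : List (String × String)) (root_id : String) (out : List (String × String)) : Prop := out = legacy_order_child_parent_alt child_parent root_id
instance (child_parent : List (String × String)) (root_id : String) (out : List (String × String)) : Decidable (Spec_legacy_order_child_parent child_parent root_id out) := by unfold Spec_legacy_order_child_parent; infer_instance

-- ===== CLAIM (what is proved, stated in full; the proofs are below) =====
def Claim_equal_legacy_order_child_parent : Prop := ∀ (child_parent : List (String × String)) (root_id : String), Dom_legacy_order_child_parent child_parent root_id → Pre_legacy_order_child_parent child_parent root_id → Spec_legacy_order_child_parent child_parent root_id (legacy_order_child_parent child_parent root_id)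

-- ===== LEMMAS AND PROOFS =====

-- ---------- proof-side abbreviations ----------
def pvKeys (cp : List (String × String)) : List String := cp.map Prod.fst
def pvPairs (cp : List (String × String)) : List (String × String) :=
  PySem.List.sorted2 cp (fun kv => kv.2) (fun kv => kv.1) false
def pvBucket (l : List (String × String)) (p : String) : List String :=
  (l.filter (fun kv => kv.2 == p)).map Prod.fst
def pvG (cp : List (String × String)) : PySem.Dict String (List String) := pvASortVals (pvAGroup cp)
def pvH (cp : List (String × String)) : PySem.Dict String (List String) :=
  (pvPairs cp).foldl (fun d kv => d.insert kv.2 (d.getD kv.2 [] ++ [kv.1])) PySem.Dict.empty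

-- level-by-level BFS used only inside the proofs (the bridge between the two ports)
def pvBLevel (g : PySem.Dict String (List String)) (frontier : List String)
    (st0 : List String × PySem.Dict String String) : List String × PySem.Dict String String :=
  frontier.foldl (fun st p =>
    (g.getD p []).foldl (fun st c =>
      if st.2.contains c then st else (st.1 ++ [c], st.2.insert c p)) st) st0

def pvBLoop (g : PySem.Dict String (List String)) :
    Nat → List String → PySem.Dict String String → PySem.Dict String String
  | 0, _, r => r
  | fuel + 1, frontier, r =>
      if frontier.isEmpty then r
      else
        let st := pvBLevel g frontier ([], r)
        pvBLoop g fuel st.1 st.2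

def pvRB (cp : List (String × String)) (root : String) : PySem.Dict String String :=
  pvBLoop (pvH cp) (cp.length + 2) [root] PySem.Dict.empty

def pvCP (cp : List (String × String)) : PySem.Dict String String := PySem.Dict.ofList cp

def pvK (cp : List (String × String)) (root x : String) : Option (List String) :=
  pvKeyOf (pvCP cp) root (cp.length + 1) x []

inductive pvReach (cp : List (String × String)) (root : String) : String → List String → Prop
  | root : pvReach cp root root []
  | step (x p : String) (t : List String) (hne : x ≠ root)
      (hget : (pvCP cp).get? x = some p) (hr : pvReach cp root p t) : pvReach cp root x (t ++ [x])

def pvTag (cp : List (String × String)) (root : String) (e : String × String) :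
    Nat × List String × String × String :=
  match pvK cp root e.2 with
  | some t => (t.length + 1, t ++ [e.1], e.1, e.2)
  | none => (0, [], e.1, e.2)

def pvEntKey (cp : List (String × String)) (root : String) (e : String × String) : pvKeyT :=
  pvKeyFn (pvTag cp root e)

def pvKeyLt (cp : List (String × String)) (root : String) : (String × String) → (String × String) → Prop :=
  fun a b => pvEntKey cp root a < pvEntKey cp root b

def pvNews (cp : List (String × String)) (root : String) (P : List String) : List (String × String) :=
  P.flatMap (fun p => if p = root then [] else ((pvH cp).getD p []).map (fun c => (c, p)))

def pvInv (cp : List (String × String)) (root : String) (k : Nat) (F : List String)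
    (r : PySem.Dict String String) : Prop :=
  r.keys.Nodup ∧
  (∀ e ∈ r.items, e ∈ cp ∧ ∃ t, pvK cp root e.2 = some t ∧ t.length + 1 ≤ k) ∧
  (∀ e ∈ cp, ∀ t, pvK cp root e.2 = some t → t.length + 1 ≤ k → e ∈ r.items) ∧
  r.items.Pairwise (pvKeyLt cp root) ∧
  ((k = 0 ∧ F = [root] ∧ r = PySem.Dict.empty) ∨
   (1 ≤ k ∧ ∃ C E, r.items = C ++ E ∧ F = E.map Prod.fst ∧
      (∀ e ∈ C, ∃ t, pvK cp root e.2 = some t ∧ t.length + 1 < k) ∧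
      (∀ e ∈ E, ∃ t, pvK cp root e.2 = some t ∧ t.length + 1 = k)))

-- the simulation relation between A's (seen, ordered) and the level BFS's result dict
def pvRel (cp : List (String × String)) (s : PySem.Set String) (o : List (String × String))
    (r : PySem.Dict String String) : Prop :=
  PySem.Dict.ofList o = r ∧ s = r.keys ∧ (∀ c p, r.get? c = some p → (c, p) ∈ cp)

def pvUnseen (cp : List (String × String)) (s : List String) : Nat :=
  ((pvKeys cp).filter (fun k => !(s.contains k))).length

-- ---------- generic small lemmas ----------

lemma pvKey_unique (cp : List (String × String)) (hnd : (pvKeys cp).Nodup)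
    {c p q : String} (h1 : (c, p) ∈ cp) (h2 : (c, q) ∈ cp) : p = q := by
  induction cp with
  | nil => cases h1
  | cons x t ih =>
      rw [pvKeys, List.map_cons, List.nodup_cons] at hnd
      rcases List.mem_cons.mp h1 with e1 | m1 <;> rcases List.mem_cons.mp h2 with e2 | m2
      · rw [← e1] at e2; exact (Prod.mk.injEq _ _ _ _ |>.mp e2).2.symm
      · exact absurd (List.mem_map.mpr ⟨(c, q), m2, by rw [← e1]⟩) hnd.1
      · exact absurd (List.mem_map.mpr ⟨(c, p), m1, by rw [← e2]⟩) hnd.1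
      · exact ih hnd.2 m1 m2

lemma pvInsert_self (r : PySem.Dict String String) (c p : String)
    (hnd : r.keys.Nodup) (h : r.get? c = some p) : r.insert c p = r := by
  have hc : r.contains c = true := by
    rw [PySem.Dict.contains_eq_isSome_get?, h]; rfl
  apply PySem.Dict.ext
  rw [PySem.Dict.items_insert_of_contains _ _ hc]
  have hmap : ∀ x ∈ r.items, (if x.1 == c then (c, p) else x) = x := by
    intro x hx
    by_cases hxc : x.1 = c
    · have hg : r.get? x.1 = some x.2 := PySem.Dict.get?_of_mem_items _ (by simpa using hx) hnd
      rw [hxc, h] at hg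
      have hxp : x.2 = p := by injection hg.symm
      rw [if_pos (by simp [hxc]), ← hxc, ← hxp]
    · simp [hxc]
  rw [List.map_congr_left hmap]
  simp

lemma pvOfList_append (a L : List (String × String)) :
    PySem.Dict.ofList (a ++ L) = L.foldl (fun d kv => d.insert kv.1 kv.2) (PySem.Dict.ofList a) := by
  simp [PySem.Dict.ofList, PySem.Dict.update, List.foldl_append]

lemma pvOfList_snoc (o : List (String × String)) (x : String × String) :
    PySem.Dict.ofList (o ++ [x]) = (PySem.Dict.ofList o).insert x.1 x.2 := by
  rw [pvOfList_append]
  rfl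

lemma pvContains_keys (r : PySem.Dict String String) (c : String) :
    PySem.Set.contains r.keys c = r.contains c := by
  apply Bool.eq_iff_iff.mpr
  simp only [PySem.Set.contains, PySem.Dict.keys, PySem.Dict.contains,
    List.contains_eq_mem, List.mem_map, decide_eq_true_eq, List.any_eq_true, beq_iff_eq]

lemma pvContains_iff_mem_fst (d : PySem.Dict String String) (c : String) :
    d.contains c = true ↔ ∃ e ∈ d.items, e.1 = c := by
  rw [← pvContains_keys]
  simp [PySem.Set.contains, PySem.Dict.keys, List.contains_eq_mem, eq_comm]

-- lexicographic helper lemmas on List String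
lemma pvLexMid (x y : String) (h : x < y) :
    ∀ (a u v : List String), a ++ x :: u < a ++ y :: v := by
  intro a
  induction a with
  | nil => intro u v; exact List.Lex.rel h
  | cons z a ih => intro u v; exact List.Lex.cons (ih u v)

lemma pvLexApp : ∀ (a b u v : List String), a.length = b.length → a < b → a ++ u < b ++ v := by
  intro a
  induction a with
  | nil =>
      intro b u v hl h
      cases b with
      | nil => cases h
      | cons _ _ => simp at hl
  | cons ha ta ih =>
      intro b u v hl h
      cases b with
      | nil => simp at hl
      | cons hb tb =>
          cases h with
          | rel h' => exact List.Lex.rel h'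
          | cons h' => exact List.Lex.cons (ih tb u v (by simpa using hl) h')

-- ---------- sortedness of pvPairs and the buckets ----------

lemma pvSorted2_eq (cp : List (String × String)) :
    pvPairs cp = PySem.List.sorted cp (fun kv => toLex (kv.2, kv.1)) false := by
  have hf : (fun (a b : String × String) => decide (a.2 < b.2) || (!decide (b.2 < a.2) && decide (a.1 < b.1)))
      = fun a b => decide (toLex (a.2, a.1) < toLex (b.2, b.1)) := by
    funext a b
    apply Bool.eq_iff_iff.mpr
    simp only [Bool.or_eq_true, Bool.and_eq_true, Bool.not_eq_true',
      decide_eq_true_eq, decide_eq_false_iff_not, Prod.Lex.lt_iff, ofLex_toLex]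
    constructor
    · rintro (h | ⟨h1, h2⟩)
      · exact Or.inl h
      · rcases lt_trichotomy a.2 b.2 with h' | h' | h'
        · exact Or.inl h'
        · exact Or.inr ⟨h', h2⟩
        · exact absurd h' h1
    · rintro (h | ⟨h1, h2⟩)
      · exact Or.inl h
      · exact Or.inr ⟨by rw [h1]; exact lt_irrefl _, h2⟩
  rw [PySem.List.sorted_eq_foldl_insertBy]
  simp only [pvPairs, PySem.List.sorted2, if_neg (by decide : ¬ (false = true))]
  rw [hf]

lemma pvPairs_perm (cp : List (String × String)) : (pvPairs cp).Perm cp :=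
  PySem.List.sorted2_perm cp _ _ false

-- grouping loop: the bucket of p is the (in-order) children of p
lemma pvGroup_getD (l : List (String × String)) (p : String) :
    (l.foldl (fun d cp => d.modify cp.2 [] (fun v => v ++ [cp.1])) PySem.Dict.empty).getD p []
      = pvBucket l p := by
  have h : l.foldl (fun d cp => d.modify cp.2 [] (fun v => v ++ [cp.1])) PySem.Dict.empty
      = (l.map Prod.swap).foldl (fun d q => d.modify q.1 [] (fun v => v ++ [q.2])) PySem.Dict.empty := by
    rw [List.foldl_map]
    simp only [Prod.fst_swap, Prod.snd_swap]
  rw [h, PySem.Dict.getD_foldl_modify_append]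
  simp [pvBucket, List.filter_map, List.map_map, Function.comp_def, Prod.fst_swap, Prod.snd_swap,
    PySem.Dict.getD_of_get?_eq_none, PySem.Dict.get?_empty]

lemma pvASortVals_get? (d : PySem.Dict String (List String)) (p : String) :
    (pvASortVals d).get? p = (d.get? p).map (fun v => PySem.List.sorted v (fun c => c) false) := by
  simp only [pvASortVals, PySem.Dict.get?, List.find?_map, Option.map_map]
  rfl

lemma pvBucketA (cp : List (String × String)) (p : String) :
    (pvG cp).getD p [] = PySem.List.sorted (pvBucket cp p) (fun c => c) false := by
  unfold pvG
  cases hg : (pvAGroup cp).get? p with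
  | none =>
      have h0 : (pvAGroup cp).getD p [] = [] := PySem.Dict.getD_of_get?_eq_none _ _ hg
      have hb : pvBucket cp p = [] := by rw [← pvGroup_getD cp p]; exact h0
      have hs : (pvASortVals (pvAGroup cp)).get? p = none := by rw [pvASortVals_get?, hg]; rfl
      rw [PySem.Dict.getD_of_get?_eq_none _ _ hs, hb]
      exact ((PySem.List.sorted_eq_nil_iff _ _ _).mpr rfl).symm
  | some v =>
      have hs : (pvASortVals (pvAGroup cp)).get? p
          = some (PySem.List.sorted v (fun c => c) false) := by rw [pvASortVals_get?, hg]; rfl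
      rw [PySem.Dict.getD_of_get?_eq_some _ _ hs]
      have h0 : (pvAGroup cp).getD p [] = v := PySem.Dict.getD_of_get?_eq_some _ _ hg
      have hb : pvBucket cp p = v := by rw [← pvGroup_getD cp p]; exact h0
      rw [hb]

lemma pvBucketB (cp : List (String × String)) (p : String) :
    (pvH cp).getD p [] = pvBucket (pvPairs cp) p := by
  have h : pvH cp = (pvPairs cp).foldl
      (fun d kv => d.modify kv.2 [] (fun v => v ++ [kv.1])) PySem.Dict.empty := rfl
  rw [h, pvGroup_getD]

lemma pvBucketP_pairwise (cp : List (String × String)) (hnd : (pvKeys cp).Nodup) (p : String) :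
    (pvBucket (pvPairs cp) p).Pairwise (· < ·) := by
  have hp : (pvPairs cp).Pairwise (fun a b => toLex (a.2, a.1) ≤ toLex (b.2, b.1)) := by
    rw [pvSorted2_eq]; exact PySem.List.sorted_pairwise _ _
  have hf := hp.filter (fun kv => kv.2 == p)
  have hle : (pvBucket (pvPairs cp) p).Pairwise (· ≤ ·) := by
    unfold pvBucket
    rw [List.pairwise_map]
    refine List.Pairwise.imp_of_mem ?_ hf
    intro a b ha hb hab
    have ha2 : a.2 = p := by simpa using (List.of_mem_filter ha)
    have hb2 : b.2 = p := by simpa using (List.of_mem_filter hb)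
    rw [ha2, hb2] at hab
    have hle2 := Prod.Lex.le_iff.mp hab
    simp only [ofLex_toLex] at hle2
    rcases hle2 with h | ⟨_, h⟩
    · exact absurd h (lt_irrefl _)
    · exact h
  have hnd2 : (pvBucket (pvPairs cp) p).Nodup := by
    have h1 : ((pvPairs cp).map Prod.fst).Nodup :=
      (((pvPairs_perm cp).map Prod.fst).nodup_iff).mpr hnd
    exact h1.sublist (List.filter_sublist.map Prod.fst)
  exact (hle.and hnd2).imp (fun h => lt_of_le_of_ne h.1 h.2)

lemma pvBucket_eq (cp : List (String × String)) (hnd : (pvKeys cp).Nodup) (p : String) :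
    (pvG cp).getD p [] = (pvH cp).getD p [] := by
  rw [pvBucketA, pvBucketB]
  apply PySem.List.sorted_eq_of_perm_of_pairwise_lt
  · exact ((pvPairs_perm cp).filter _).map _
  · exact pvBucketP_pairwise cp hnd p

lemma pvBucketH_pairwise (cp : List (String × String)) (hnd : (pvKeys cp).Nodup) (p : String) :
    ((pvH cp).getD p []).Pairwise (· < ·) := by
  rw [pvBucketB]; exact pvBucketP_pairwise cp hnd p

lemma pvBucketH_mem (cp : List (String × String)) (p c : String) :
    c ∈ (pvH cp).getD p [] ↔ (c, p) ∈ cp := by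
  rw [pvBucketB]
  constructor
  · intro h
    rcases List.mem_map.mp h with ⟨kv, hkv, rfl⟩
    have h2 : kv.2 = p := by simpa using List.of_mem_filter hkv
    have hm : kv ∈ pvPairs cp := List.mem_of_mem_filter hkv
    have : kv ∈ cp := (pvPairs_perm cp).mem_iff.mp hm
    rw [← h2]; simpa using this
  · intro h
    refine List.mem_map.mpr ⟨(c, p), List.mem_filter.mpr ⟨?_, by simp⟩, rfl⟩
    exact (pvPairs_perm cp).mem_iff.mpr h

-- ---------- key_of characterization ----------

lemma pvKeyOf_acc (D : PySem.Dict String String) (r : String) :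
    ∀ (f : Nat) (x : String) (path : List String),
    pvKeyOf D r f x path = (pvKeyOf D r f x []).map (fun t => t ++ path.reverse) := by
  intro f
  induction f with
  | zero => intro x path; rfl
  | succ f ih =>
      intro x path
      simp only [pvKeyOf]
      by_cases hx : (x == r) = true
      · simp [hx]
      · rw [if_neg hx, if_neg hx]
        cases hg : D.get? x with
        | none => rfl
        | some p =>
            show pvKeyOf D r f p (path ++ [x])
                = Option.map (fun t => t ++ path.reverse) (pvKeyOf D r f p ([] ++ [x]))
            rw [List.nil_append, ih p (path ++ [x]), ih p [x]]
            cases pvKeyOf D r f p [] <;> simp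

lemma pvReach_of_keyOf (cp : List (String × String)) (root : String) :
    ∀ (f : Nat) (x : String) (t : List String),
    pvKeyOf (pvCP cp) root f x [] = some t → pvReach cp root x t := by
  intro f
  induction f with
  | zero => intro x t h; cases h
  | succ f ih =>
      intro x t h
      rw [pvKeyOf] at h
      by_cases hx : (x == root) = true
      · rw [if_pos hx] at h
        have hxr : x = root := by simpa using hx
        have ht : t = [] := by simpa using h.symm
        subst hxr; subst ht; exact pvReach.root
      · rw [if_neg hx] at h
        cases hg : (pvCP cp).get? x with
        | none => rw [hg] at h; cases h
        | some p =>
            rw [hg] at h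
            replace h : pvKeyOf (pvCP cp) root f p [x] = some t := h
            rw [pvKeyOf_acc] at h
            cases hk : pvKeyOf (pvCP cp) root f p [] with
            | none => rw [hk] at h; cases h
            | some t' =>
                rw [hk] at h
                simp only [Option.map_some] at h
                have ht : t = t' ++ [x] := by simpa using h.symm
                subst ht
                exact pvReach.step x p t' (by simpa using hx) hg (ih p t' hk)

lemma pvReach_det {cp : List (String × String)} {root x : String} {t t' : List String}
    (h : pvReach cp root x t) (h' : pvReach cp root x t') : t = t' := by
  induction h generalizing t' with
  | root =>
      cases h' with
      | root => rfl
      | step _ _ _ hne _ _ => exact absurd rfl hne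
  | step x p t hne hget hr ih =>
      cases h' with
      | root => exact absurd rfl hne
      | step _ p' t₂ _ hget' hr' =>
          have hp : p = p' := by rw [hget] at hget'; injection hget'
          subst hp
          rw [ih hr']

lemma pvReach_nil {cp : List (String × String)} {root x : String} {t : List String}
    (h : pvReach cp root x t) (ht : t = []) : x = root := by
  cases h with
  | root => rfl
  | step x p t hne hget hr => simp at ht

lemma pvReach_mem_prefix {cp : List (String × String)} {root x : String} {t : List String}
    (h : pvReach cp root x t) : ∀ y ∈ t, ∃ u, u <+: t ∧ pvReach cp root y u := by
  induction h with
  | root => intro y hy; cases hy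
  | step x p t hne hget hr ih =>
      intro y hy
      rcases List.mem_append.mp hy with hy | hy
      · rcases ih y hy with ⟨u, hu, hru⟩
        exact ⟨u, hu.trans (t.prefix_append [x]), hru⟩
      · rcases List.mem_singleton.mp hy with rfl
        exact ⟨t ++ [y], List.prefix_refl _, pvReach.step y p t hne hget hr⟩

lemma pvReach_nodup {cp : List (String × String)} {root x : String} {t : List String}
    (h : pvReach cp root x t) : t.Nodup := by
  induction h with
  | root => exact List.nodup_nil
  | step x p t hne hget hr ih =>
      rw [List.nodup_append]
      refine ⟨ih, List.nodup_singleton x, ?_⟩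
      intro a ha b hb hab
      rcases List.mem_singleton.mp hb with rfl
      subst hab
      rcases pvReach_mem_prefix hr a ha with ⟨u, hu, hru⟩
      have := pvReach_det hru (pvReach.step a p t hne hget hr)
      subst this
      have h1 := hu.length_le
      simp at h1

lemma pvReach_mem_get {cp : List (String × String)} {root x : String} {t : List String}
    (h : pvReach cp root x t) : ∀ y ∈ t, ∃ q, (pvCP cp).get? y = some q := by
  induction h with
  | root => intro y hy; cases hy
  | step x p t hne hget hr ih =>
      intro y hy
      rcases List.mem_append.mp hy with hy | hy
      · exact ih y hy
      · rcases List.mem_singleton.mp hy with rfl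
        exact ⟨p, hget⟩

lemma pvReach_len_le {cp : List (String × String)} {root x : String} {t : List String}
    (h : pvReach cp root x t) : t.length ≤ cp.length := by
  have hsub : t ⊆ (pvCP cp).keys := by
    intro y hy
    rcases pvReach_mem_get h y hy with ⟨q, hq⟩
    exact PySem.Dict.mem_keys_of_mem_items (pvCP cp)
      (PySem.Dict.mem_items_of_get?_eq_some (pvCP cp) hq)
  have h1 : t.length ≤ (pvCP cp).keys.length :=
    ((pvReach_nodup h).subperm hsub).length_le
  have h2 : (pvCP cp).keys.length ≤ cp.length := by
    have : (pvCP cp).keys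
        = PySem.Set.update (PySem.Dict.empty : PySem.Dict String String).keys (cp.map Prod.fst) := by
      simpa [pvCP, PySem.Dict.ofList] using
        PySem.Dict.keys_foldl_insert_key cp Prod.fst (fun _ kv => kv.2) PySem.Dict.empty
    rw [this]
    simpa [PySem.Dict.keys_empty, PySem.Set.update_nil_left] using
      (PySem.Set.length_ofList_le (cp.map Prod.fst)).trans (by simp)
  omega

lemma pvKeyOf_of_reach {cp : List (String × String)} {root x : String} {t : List String}
    (h : pvReach cp root x t) :
    ∀ f, t.length + 1 ≤ f → pvKeyOf (pvCP cp) root f x [] = some t := by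
  induction h with
  | root =>
      intro f hf
      obtain ⟨f', rfl⟩ : ∃ f', f = f' + 1 := ⟨f - 1, by omega⟩
      simp [pvKeyOf]
  | step x p t hne hget hr ih =>
      intro f hf
      obtain ⟨f', rfl⟩ : ∃ f', f = f' + 1 := ⟨f - 1, by omega⟩
      rw [pvKeyOf, if_neg (by simpa using hne), hget]
      show pvKeyOf (pvCP cp) root f' p ([] ++ [x]) = some (t ++ [x])
      rw [List.nil_append, pvKeyOf_acc, ih f' (by simp at hf; omega)]
      simp

lemma pvK_iff (cp : List (String × String)) (root x : String) (t : List String) :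
    pvK cp root x = some t ↔ pvReach cp root x t := by
  constructor
  · exact pvReach_of_keyOf cp root _ x t
  · intro h
    exact pvKeyOf_of_reach h _ (by have := pvReach_len_le h; omega)

lemma pvK_root (cp : List (String × String)) (root : String) : pvK cp root root = some [] := by
  simp [pvK, pvKeyOf]

-- ---------- the dict built from cp ----------

lemma pvCP_items (cp : List (String × String)) (hnd : (pvKeys cp).Nodup) :
    (pvCP cp).items = cp := by
  have h := PySem.Dict.items_foldl_insert_fresh cp Prod.fst Prod.snd PySem.Dict.empty
    (fun a _ => PySem.Dict.contains_empty a.1) hnd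
  simpa [pvCP, PySem.Dict.ofList] using h

lemma pvCP_keys_nodup (cp : List (String × String)) (hnd : (pvKeys cp).Nodup) :
    (pvCP cp).keys.Nodup := by
  simp only [PySem.Dict.keys, pvCP_items cp hnd]
  exact hnd

lemma pvCP_get?_iff (cp : List (String × String)) (hnd : (pvKeys cp).Nodup) (c p : String) :
    (pvCP cp).get? c = some p ↔ (c, p) ∈ cp := by
  rw [PySem.Dict.get?_eq_some_iff_mem_items (pvCP cp) c p (pvCP_keys_nodup cp hnd),
    pvCP_items cp hnd]

-- ---------- A-side: queue loop vs level BFS (simulation) ----------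

lemma pvAStep_shift (pc : PySem.Dict String (List String)) (p : String)
    (x : List String) (q : List String) (s : PySem.Set String) (o : List (String × String)) :
    pvAStep pc p (x ++ q, s, o) =
      (x ++ (pvAStep pc p (q, s, o)).1, (pvAStep pc p (q, s, o)).2) := by
  unfold pvAStep
  generalize pc.getD p [] = l
  induction l generalizing q s o with
  | nil => simp
  | cons c t ih =>
      simp only [List.foldl_cons]
      by_cases h : PySem.Set.contains s c = true
      · simp only [h, if_true]
        exact ih q s (o ++ [(c, p)])
      · simp only [h, if_false, Bool.false_eq_true]
        rw [List.append_assoc]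
        exact ih (q ++ [c]) (PySem.Set.add s c) (o ++ [(c, p)])

lemma pvALoop_nil (pc : PySem.Dict String (List String)) (fuel : Nat)
    (s : PySem.Set String) (o : List (String × String)) :
    pvALoop pc fuel [] s o = (s, o) := by cases fuel <;> rfl

lemma pvBLoop_nil (g : PySem.Dict String (List String)) (fuel : Nat)
    (r : PySem.Dict String String) : pvBLoop g fuel [] r = r := by
  cases fuel with
  | zero => rfl
  | succ n => simp [pvBLoop]

lemma pvAUnroll (pc : PySem.Dict String (List String)) :
    ∀ (F : List String) (fuel : Nat), F.length ≤ fuel →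
    ∀ (q : List String) (s : PySem.Set String) (o : List (String × String)),
    pvALoop pc fuel (F ++ q) s o =
      (let st := F.foldl (fun st p => pvAStep pc p st) (q, s, o)
       pvALoop pc (fuel - F.length) st.1 st.2.1 st.2.2) := by
  intro F
  induction F with
  | nil => intro fuel _ q s o; simp
  | cons p F' ih =>
      intro fuel hf q s o
      cases fuel with
      | zero => simp at hf
      | succ f =>
          have hf' : F'.length ≤ f := by simpa using hf
          simp only [List.cons_append, pvALoop]
          rw [pvAStep_shift]
          have hfold : (p :: F').foldl (fun st p => pvAStep pc p st) (q, s, o)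
              = F'.foldl (fun st p => pvAStep pc p st) (pvAStep pc p (q, s, o)) := by
            simp
          rw [hfold]
          have := ih f hf' (pvAStep pc p (q, s, o)).1 (pvAStep pc p (q, s, o)).2.1
            (pvAStep pc p (q, s, o)).2.2
          simp only [List.length_cons, Nat.succ_sub_succ]
          rw [← this]

lemma pvUnseen_snoc (cp : List (String × String)) (hnd : (pvKeys cp).Nodup)
    {c : String} {s : List String} (hc : c ∈ pvKeys cp) (hs : c ∉ s) :
    pvUnseen cp (s ++ [c]) + 1 = pvUnseen cp s := by
  unfold pvUnseen
  have hfn : (fun k => !((s ++ [c]).contains k)) = (fun k => (!(s.contains k)) && (k != c)) := by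
    funext k
    by_cases h1 : k ∈ s <;> by_cases h2 : k = c <;>
      simp [List.contains_eq_mem, List.mem_append, h1, h2]
  rw [hfn]
  have hsplit : (pvKeys cp).filter (fun k => (!(s.contains k)) && (k != c))
      = ((pvKeys cp).filter (fun k => !(s.contains k))).filter (fun k => k != c) := by
    rw [List.filter_filter]
    congr 1
    funext k
    rw [Bool.and_comm]
  rw [hsplit]
  set F0 := (pvKeys cp).filter (fun k => !(s.contains k)) with hF0
  have hndF0 : F0.Nodup := hnd.filter _
  have hcF0 : c ∈ F0 := by
    rw [hF0, List.mem_filter]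
    exact ⟨hc, by simp [List.contains_eq_mem, hs]⟩
  rw [← List.Nodup.erase_eq_filter hndF0 c, List.length_erase_of_mem hcF0]
  have : 1 ≤ F0.length := List.length_pos_iff.mpr (List.ne_nil_of_mem hcF0)
  omega

lemma pvUnseen_append (cp : List (String × String)) (hnd : (pvKeys cp).Nodup) :
    ∀ (δ : List String) (s : List String), δ.Nodup → (∀ c ∈ δ, c ∈ pvKeys cp ∧ c ∉ s) →
    pvUnseen cp (s ++ δ) + δ.length = pvUnseen cp s := by
  intro δ
  induction δ with
  | nil => intro s _ _; simp
  | cons c δ' ih =>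
      intro s hδnd hfr
      rcases List.nodup_cons.mp hδnd with ⟨hcδ', hδ'nd⟩
      rcases hfr c (List.mem_cons_self) with ⟨hck, hcs⟩
      have hrw : s ++ c :: δ' = (s ++ [c]) ++ δ' := by simp
      rw [hrw]
      have hfr' : ∀ c' ∈ δ', c' ∈ pvKeys cp ∧ c' ∉ (s ++ [c]) := by
        intro c' hc'
        rcases hfr c' (List.mem_cons_of_mem _ hc') with ⟨h1, h2⟩
        refine ⟨h1, ?_⟩
        intro hmem
        rcases List.mem_append.mp hmem with h | h
        · exact h2 h
        · rcases List.mem_singleton.mp h with rfl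
          exact hcδ' hc'
      have h1 := ih (s ++ [c]) hδ'nd hfr'
      have h2 := pvUnseen_snoc cp hnd hck hcs
      simp only [List.length_cons]
      omega

lemma pvInner (cp : List (String × String)) (hnd : (pvKeys cp).Nodup) (p : String) :
    ∀ (l : List String), (∀ c ∈ l, (c, p) ∈ cp) →
    ∀ (q nx : List String) (s : PySem.Set String) (o : List (String × String))
      (r : PySem.Dict String String), pvRel cp s o r →
    ∃ δ s' o' r',
      l.foldl (fun st c =>
        let o2 := st.2.2 ++ [(c, p)]
        if PySem.Set.contains st.2.1 c then (st.1, st.2.1, o2)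
        else (st.1 ++ [c], PySem.Set.add st.2.1 c, o2)) (q, s, o) = (q ++ δ, s', o') ∧
      l.foldl (fun st c => if st.2.contains c then st
        else (st.1 ++ [c], st.2.insert c p)) (nx, r) = (nx ++ δ, r') ∧
      pvRel cp s' o' r' ∧ s' = s ++ δ ∧ δ.Nodup ∧ (∀ c ∈ δ, c ∈ pvKeys cp ∧ c ∉ s) := by
  intro l
  induction l with
  | nil =>
      intro _ q nx s o r hrel
      exact ⟨[], s, o, r, by simp, by simp, hrel, by simp, List.nodup_nil, by simp⟩
  | cons c t ih =>
      intro hl q nx s o r hrel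
      obtain ⟨h1, h2, h3⟩ := hrel
      have hc : (c, p) ∈ cp := hl c List.mem_cons_self
      have hndk : r.keys.Nodup := by rw [← h1]; exact PySem.Dict.nodup_keys_ofList o
      have hl' : ∀ c' ∈ t, (c', p) ∈ cp := fun c' h => hl c' (List.mem_cons_of_mem _ h)
      by_cases hseen : PySem.Set.contains s c = true
      · have hcs : c ∈ s := (PySem.Set.contains_iff s c).mp hseen
        have hrc : r.contains c = true := by rw [← pvContains_keys, ← h2]; exact hseen
        have hget : ∃ v, r.get? c = some v := by
          have := PySem.Dict.contains_eq_isSome_get? (d := r) (k := c)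
          rw [hrc] at this
          cases hv : r.get? c with
          | none => rw [hv] at this; simp at this
          | some v => exact ⟨v, rfl⟩
        obtain ⟨v, hv⟩ := hget
        have hvp : v = p := pvKey_unique cp hnd (h3 c v hv) hc
        have hinsert : r.insert c p = r := pvInsert_self r c p hndk (by rw [hv, hvp])
        have hrel' : pvRel cp s (o ++ [(c, p)]) r :=
          ⟨by rw [pvOfList_snoc, h1]; exact hinsert, h2, h3⟩
        obtain ⟨δ, s', o', r', hA, hB, hrel'', hs', hδnd, hfr⟩ := ih hl' q nx s (o ++ [(c, p)]) r hrel'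
        refine ⟨δ, s', o', r', ?_, ?_, hrel'', hs', hδnd, hfr⟩
        · simp only [List.foldl_cons, hseen, if_true]; exact hA
        · simp only [List.foldl_cons, hrc, if_true]; exact hB
      · have hseen' : PySem.Set.contains s c = false := by
          cases h : PySem.Set.contains s c
          · rfl
          · exact absurd h hseen
        have hcs : c ∉ s := by
          intro h; exact hseen ((PySem.Set.contains_iff s c).mpr h)
        have hrc : r.contains c = false := by rw [← pvContains_keys, ← h2]; exact hseen'
        have hadd : PySem.Set.add s c = s ++ [c] := PySem.Set.add_of_not_mem hcs
        have hrel' : pvRel cp (s ++ [c]) (o ++ [(c, p)]) (r.insert c p) := by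
          refine ⟨by rw [pvOfList_snoc, h1], ?_, ?_⟩
          · rw [PySem.Dict.keys_insert_of_not_contains _ _ hrc, h2]
          · intro c' p' hget
            rw [PySem.Dict.get?_insert] at hget
            split at hget
            · rename_i he
              injection hget with hh
              rw [he, ← hh]
              exact hc
            · exact h3 c' p' hget
        obtain ⟨δ, s', o', r', hA, hB, hrel'', hs', hδnd, hfr⟩ :=
          ih hl' (q ++ [c]) (nx ++ [c]) (s ++ [c]) (o ++ [(c, p)]) (r.insert c p) hrel'
        refine ⟨c :: δ, s', o', r', ?_, ?_, hrel'', ?_, ?_, ?_⟩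
        · simp only [List.foldl_cons, hseen', if_false, Bool.false_eq_true]
          rw [hadd, hA]; simp
        · simp only [List.foldl_cons, hrc, if_false, Bool.false_eq_true]
          rw [hB]; simp
        · rw [hs']; simp
        · refine List.nodup_cons.mpr ⟨?_, hδnd⟩
          intro hcin
          exact (hfr c hcin).2 (by simp)
        · intro c' hc'
          rcases List.mem_cons.mp hc' with rfl | h
          · exact ⟨List.mem_map.mpr ⟨(c', p), hc, rfl⟩, hcs⟩
          · rcases hfr c' h with ⟨h1', h2'⟩
            exact ⟨h1', fun hn => h2' (List.mem_append.mpr (Or.inl hn))⟩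

lemma pvLevel (cp : List (String × String)) (hnd : (pvKeys cp).Nodup) :
    ∀ (F : List String) (q nx : List String) (s : PySem.Set String)
      (o : List (String × String)) (r : PySem.Dict String String), pvRel cp s o r →
    ∃ δ s' o' r',
      F.foldl (fun st p => pvAStep (pvG cp) p st) (q, s, o) = (q ++ δ, s', o') ∧
      pvBLevel (pvH cp) F (nx, r) = (nx ++ δ, r') ∧
      pvRel cp s' o' r' ∧ s' = s ++ δ ∧ δ.Nodup ∧ (∀ c ∈ δ, c ∈ pvKeys cp ∧ c ∉ s) := by
  intro F
  induction F with
  | nil =>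
      intro q nx s o r hrel
      exact ⟨[], s, o, r, by simp, by simp [pvBLevel], hrel, by simp, List.nodup_nil, by simp⟩
  | cons p F' ih =>
      intro q nx s o r hrel
      have hl : ∀ c ∈ (pvG cp).getD p [], (c, p) ∈ cp := by
        intro c hcm
        rw [pvBucket_eq cp hnd] at hcm
        exact (pvBucketH_mem cp p c).mp hcm
      obtain ⟨δ1, s1, o1, r1, hA1, hB1, hrel1, hs1, hδ1nd, hfr1⟩ :=
        pvInner cp hnd p ((pvG cp).getD p []) hl q nx s o r hrel
      obtain ⟨δ2, s2, o2, r2, hA2, hB2, hrel2, hs2, hδ2nd, hfr2⟩ :=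
        ih (q ++ δ1) (nx ++ δ1) s1 o1 r1 hrel1
      refine ⟨δ1 ++ δ2, s2, o2, r2, ?_, ?_, hrel2, ?_, ?_, ?_⟩
      · simp only [List.foldl_cons]
        have hstep : pvAStep (pvG cp) p (q, s, o) = (q ++ δ1, s1, o1) := hA1
        rw [hstep, hA2, List.append_assoc]
      · simp only [pvBLevel, List.foldl_cons]
        have hstep : ((pvH cp).getD p []).foldl
            (fun st c => if st.2.contains c then st else (st.1 ++ [c], st.2.insert c p)) (nx, r)
            = (nx ++ δ1, r1) := by
          rw [← pvBucket_eq cp hnd]; exact hB1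
        rw [hstep]
        have := hB2
        simp only [pvBLevel] at this
        rw [this, List.append_assoc]
      · rw [hs2, hs1, List.append_assoc]
      · rw [List.nodup_append]
        refine ⟨hδ1nd, hδ2nd, ?_⟩
        intro a ha1 b hb hab
        subst hab
        exact (hfr2 a hb).2 (by rw [hs1]; exact List.mem_append.mpr (Or.inr ha1))
      · intro c hcm
        rcases List.mem_append.mp hcm with h | h
        · exact hfr1 c h
        · rcases hfr2 c h with ⟨hk, hns⟩
          exact ⟨hk, fun hn => hns (by rw [hs1]; exact List.mem_append.mpr (Or.inl hn))⟩

lemma pvSim (cp : List (String × String)) (hnd : (pvKeys cp).Nodup) (root : String) :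
    ∀ (fB : Nat) (F : List String) (s : PySem.Set String) (o : List (String × String))
      (r : PySem.Dict String String) (fA : Nat), pvRel cp s o r →
    2 + pvUnseen cp s ≤ fB → F.length + 2 * pvUnseen cp s ≤ fA →
    pvRel cp (pvALoop (pvG cp) fA F s o).1 (pvALoop (pvG cp) fA F s o).2
      (pvBLoop (pvH cp) fB F r) := by
  intro fB
  induction fB with
  | zero => intro F s o r fA _ h _; omega
  | succ fB ih =>
      intro F s o r fA hrel hB hA
      cases F with
      | nil => rw [pvALoop_nil, pvBLoop_nil]; exact hrel
      | cons p F' =>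
          obtain ⟨δ, s', o', r', hAf, hBf, hrel', hs', hδnd, hfr⟩ :=
            pvLevel cp hnd (p :: F') [] [] s o r hrel
          have hlen : (p :: F').length ≤ fA := by omega
          have hunroll := pvAUnroll (pvG cp) (p :: F') fA hlen [] s o
          rw [List.append_nil] at hunroll
          rw [hunroll]
          simp only [hAf, List.nil_append]
          have hBstep : pvBLoop (pvH cp) (fB + 1) (p :: F') r
              = pvBLoop (pvH cp) fB δ r' := by
            simp only [pvBLoop, List.isEmpty_cons, if_neg (by simp : ¬ (false = true))]
            rw [hBf]
            simp
          rw [hBstep]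
          have hM : pvUnseen cp s' + δ.length = pvUnseen cp s := by
            rw [hs']
            exact pvUnseen_append cp hnd δ s hδnd hfr
          by_cases hδ : δ = []
          · subst hδ
            rw [pvALoop_nil, pvBLoop_nil]
            exact hrel'
          · have hpos : 1 ≤ δ.length := List.length_pos_iff.mpr hδ
            exact ih δ s' o' r' (fA - (p :: F').length) hrel'
              (by omega) (by simp only [List.length_cons] at *; omega)

-- A's result, expressed through the level BFS
lemma pvA_items (cp : List (String × String)) (root : String) (hnd : (pvKeys cp).Nodup) :
    legacy_order_child_parent cp root
      = (pvRB cp root).items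
          ++ (pvPairs cp).filter (fun kv => !((pvRB cp root).contains kv.1)) := by
  unfold legacy_order_child_parent
  simp only [show PySem.List.sorted2 cp (fun kv => kv.2) (fun kv => kv.1) false = pvPairs cp from rfl,
    show pvASortVals (pvAGroup cp) = pvG cp from rfl]
  have hrel0 : pvRel cp PySem.Set.empty [] PySem.Dict.empty :=
    ⟨rfl, rfl, fun c p h => by rw [PySem.Dict.get?_empty] at h; cases h⟩
  have hunseen0 : pvUnseen cp PySem.Set.empty = cp.length := by
    simp [pvUnseen, pvKeys, PySem.Set.empty, List.contains_eq_mem]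
  have hb1 : 2 + pvUnseen cp PySem.Set.empty ≤ cp.length + 2 := by rw [hunseen0]; omega
  have hb2 : [root].length + 2 * pvUnseen cp PySem.Set.empty ≤ 2 * cp.length + 2 := by
    rw [hunseen0]; simp; omega
  have hsim := pvSim cp hnd root (cp.length + 2) [root] PySem.Set.empty [] PySem.Dict.empty
    (2 * cp.length + 2) hrel0 hb1 hb2
  set so := pvALoop (pvG cp) (2 * cp.length + 2) [root] PySem.Set.empty []
  have hRB : pvBLoop (pvH cp) (cp.length + 2) [root] PySem.Dict.empty = pvRB cp root := rfl
  rw [hRB] at hsim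
  obtain ⟨hof, hkeys, _⟩ := hsim
  set rB := pvRB cp root
  set pairs := pvPairs cp with hpairs
  have hcond : ∀ kv : String × String,
      PySem.Set.contains so.1 kv.1 = rB.contains kv.1 := by
    intro kv
    rw [hkeys, pvContains_keys]
  have hAfold : pairs.foldl (fun o kv => if PySem.Set.contains so.1 kv.1 then o else o ++ [kv]) so.2
      = so.2 ++ (pairs.filter (fun kv => !(rB.contains kv.1))).map (fun kv => kv) := by
    have hfn : (fun (o : List (String × String)) kv =>
        if PySem.Set.contains so.1 kv.1 then o else o ++ [kv])
        = (fun o kv => if (!(rB.contains kv.1)) = true then o ++ [(fun kv => kv) kv] else o) := by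
      funext o kv
      rw [hcond kv]
      cases h : rB.contains kv.1 <;> simp
    rw [hfn, PySem.List.foldl_append_if]
  have hndpairs : (pairs.map Prod.fst).Nodup :=
    (((pvPairs_perm cp).map Prod.fst).nodup_iff).mpr hnd
  have hndL : ((pairs.filter (fun kv => !(rB.contains kv.1))).map Prod.fst).Nodup :=
    hndpairs.sublist (List.filter_sublist.map Prod.fst)
  have hfresh : ∀ kv ∈ pairs.filter (fun kv => !(rB.contains kv.1)),
      rB.contains kv.1 = false := by
    intro kv hkv
    have := List.of_mem_filter hkv
    simpa using this
  rw [hAfold, List.map_id', pvOfList_append, hof]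
  rw [PySem.Dict.items_foldl_insert_fresh _ Prod.fst Prod.snd rB hfresh hndL]
  simp

-- ---------- level BFS produces the entries in key order ----------

lemma pvInnerStale (p : String) :
    ∀ (l : List String) (nx : List String) (d : PySem.Dict String String),
    (∀ c ∈ l, d.contains c = true) →
    l.foldl (fun st c => if st.2.contains c then st else (st.1 ++ [c], st.2.insert c p)) (nx, d)
      = (nx, d) := by
  intro l
  induction l with
  | nil => intro nx d _; rfl
  | cons c t ih =>
      intro nx d h
      simp only [List.foldl_cons, h c List.mem_cons_self, if_true]
      exact ih nx d (fun c' hc' => h c' (List.mem_cons_of_mem _ hc'))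

lemma pvInnerFresh (p : String) :
    ∀ (l : List String) (nx : List String) (d : PySem.Dict String String),
    l.Nodup → (∀ c ∈ l, d.contains c = false) →
    l.foldl (fun st c => if st.2.contains c then st else (st.1 ++ [c], st.2.insert c p)) (nx, d)
      = (nx ++ l, l.foldl (fun d c => d.insert c p) d) := by
  intro l
  induction l with
  | nil => intro nx d _ _; simp
  | cons c t ih =>
      intro nx d hndl hf
      rcases List.nodup_cons.mp hndl with ⟨hct, hndt⟩
      simp only [List.foldl_cons, hf c List.mem_cons_self, if_false, Bool.false_eq_true]
      have hf' : ∀ c' ∈ t, (d.insert c p).contains c' = false := by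
        intro c' hc'
        rw [PySem.Dict.contains_insert]
        have : c' ≠ c := fun he => hct (he ▸ hc')
        simp [this, hf c' (List.mem_cons_of_mem _ hc')]
      rw [ih (nx ++ [c]) (d.insert c p) hndt hf']
      simp

lemma pvNews_mem (cp : List (String × String)) (root : String) (P : List String)
    (e : String × String) :
    e ∈ pvNews cp root P ↔ e.2 ∈ P ∧ e.2 ≠ root ∧ e.1 ∈ (pvH cp).getD e.2 [] := by
  unfold pvNews
  rw [List.mem_flatMap]
  constructor
  · rintro ⟨p, hp, he⟩
    by_cases hr : p = root
    · rw [if_pos hr] at he; cases he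
    · rw [if_neg hr] at he
      rcases List.mem_map.mp he with ⟨c, hc, rfl⟩
      exact ⟨hp, hr, hc⟩
  · rintro ⟨hp, hr, hc⟩
    refine ⟨e.2, hp, ?_⟩
    rw [if_neg hr]
    exact List.mem_map.mpr ⟨e.1, hc, rfl⟩


-- tag / key facts
lemma pvTag_c (cp : List (String × String)) (root : String) (e : String × String) :
    (pvTag cp root e).2.2.1 = e.1 := by
  unfold pvTag; cases pvK cp root e.2 <;> rfl

lemma pvTag_p (cp : List (String × String)) (root : String) (e : String × String) :
    (pvTag cp root e).2.2.2 = e.2 := by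
  unfold pvTag; cases pvK cp root e.2 <;> rfl

lemma pvTag_inj (cp : List (String × String)) (root : String) :
    Function.Injective (pvTag cp root) := by
  intro a b h
  have h1 : a.1 = b.1 := by rw [← pvTag_c cp root a, ← pvTag_c cp root b, h]
  have h2 : a.2 = b.2 := by rw [← pvTag_p cp root a, ← pvTag_p cp root b, h]
  exact Prod.ext h1 h2

lemma pvEntKey_eq (cp : List (String × String)) (root : String) {e : String × String}
    {t : List String} (hK : pvK cp root e.2 = some t) :
    pvEntKey cp root e = toLex (t.length + 1, toLex (t ++ [e.1], toLex (e.1, e.2))) := by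
  simp [pvEntKey, pvTag, pvKeyFn, hK]

lemma pvK_child (cp : List (String × String)) (root : String) (hnd : (pvKeys cp).Nodup)
    {e : String × String} {t : List String} (he : e ∈ cp) (hne : e.1 ≠ root)
    (ht : pvK cp root e.2 = some t) : pvK cp root e.1 = some (t ++ [e.1]) := by
  refine (pvK_iff cp root e.1 (t ++ [e.1])).mpr ?_
  refine pvReach.step e.1 e.2 t hne ?_ ((pvK_iff cp root e.2 t).mp ht)
  exact (pvCP_get?_iff cp hnd e.1 e.2).mpr (by simpa using he)

lemma pvKeyLt_of_depth_lt (cp : List (String × String)) (root : String)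
    {a b : String × String} {ta tb : List String}
    (hKa : pvK cp root a.2 = some ta) (hKb : pvK cp root b.2 = some tb)
    (h : ta.length < tb.length) : pvKeyLt cp root a b := by
  show pvEntKey cp root a < pvEntKey cp root b
  rw [pvEntKey_eq cp root hKa, pvEntKey_eq cp root hKb]
  refine Prod.Lex.lt_iff.mpr (Or.inl ?_)
  show ta.length + 1 < tb.length + 1
  omega

lemma pvKeyLt_same_parent (cp : List (String × String)) (root : String)
    {p' : String} {t : List String} (hK : pvK cp root p' = some t)
    {c1 c2 : String} (h : c1 < c2) : pvKeyLt cp root (c1, p') (c2, p') := by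
  show pvEntKey cp root (c1, p') < pvEntKey cp root (c2, p')
  rw [pvEntKey_eq cp root (e := (c1, p')) hK, pvEntKey_eq cp root (e := (c2, p')) hK]
  refine Prod.Lex.lt_iff.mpr (Or.inr ⟨rfl, Prod.Lex.lt_iff.mpr (Or.inl ?_)⟩)
  exact pvLexMid c1 c2 h t [] []

lemma pvKeyLt_cross (cp : List (String × String)) (root : String)
    {pa pb : String} {ta tb : List String}
    (hKa : pvK cp root pa = some ta) (hKb : pvK cp root pb = some tb)
    (hlen : ta.length = tb.length) (hlt : ta < tb) (ca cb : String) :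
    pvKeyLt cp root (ca, pa) (cb, pb) := by
  show pvEntKey cp root (ca, pa) < pvEntKey cp root (cb, pb)
  rw [pvEntKey_eq cp root (e := (ca, pa)) hKa, pvEntKey_eq cp root (e := (cb, pb)) hKb]
  refine Prod.Lex.lt_iff.mpr (Or.inr ⟨?_, Prod.Lex.lt_iff.mpr (Or.inl ?_)⟩)
  · show ta.length + 1 = tb.length + 1
    omega
  · exact pvLexApp ta tb [ca] [cb] hlen hlt

-- the middle fold of one BFS level
lemma pvLevelMid (cp : List (String × String)) (root : String) (hnd : (pvKeys cp).Nodup)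
    (r : PySem.Dict String String) :
    ∀ (P : List String) (nx : List String) (d : PySem.Dict String String)
      (Δacc : List (String × String)),
    d.items = r.items ++ Δacc → d.keys.Nodup →
    (∀ c ∈ (pvH cp).getD root [], r.contains c = true) →
    (∀ p ∈ P, p ≠ root → ∀ c ∈ (pvH cp).getD p [], r.contains c = false) →
    (∀ e ∈ Δacc, e ∈ cp ∧ e.2 ∉ P) →
    P.Nodup →
    ∃ d', pvBLevel (pvH cp) P (nx, d) = (nx ++ (pvNews cp root P).map Prod.fst, d') ∧
      d'.items = d.items ++ pvNews cp root P ∧ d'.keys.Nodup := by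
  intro P
  induction P with
  | nil =>
      intro nx d Δacc hmono hknd _ _ _ _
      exact ⟨d, by simp [pvBLevel, pvNews], by simp [pvNews], hknd⟩
  | cons p P' ih =>
      intro nx d Δacc hmono hknd hstale hfresh hΔ hP
      rcases List.nodup_cons.mp hP with ⟨hpP', hP'⟩
      have hstep : pvBLevel (pvH cp) (p :: P') (nx, d)
          = pvBLevel (pvH cp) P'
              (((pvH cp).getD p []).foldl
                (fun st c => if st.2.contains c then st else (st.1 ++ [c], st.2.insert c p)) (nx, d)) := by
        simp [pvBLevel]
      by_cases hr : p = root
      · -- all of root's children are already present: the fold is the identity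
        subst hr
        have hall : ∀ c ∈ (pvH cp).getD p [], d.contains c = true := by
          intro c hc
          rcases (pvContains_iff_mem_fst r c).mp (hstale c hc) with ⟨e, he, hec⟩
          exact (pvContains_iff_mem_fst d c).mpr
            ⟨e, by rw [hmono]; exact List.mem_append.mpr (Or.inl he), hec⟩
        rw [hstep, pvInnerStale p _ nx d hall]
        obtain ⟨d', h1, h2, h3⟩ := ih nx d Δacc hmono hknd hstale
          (fun q hq => hfresh q (List.mem_cons_of_mem _ hq))
          (fun e he => ⟨(hΔ e he).1, fun hm => (hΔ e he).2 (List.mem_cons_of_mem _ hm)⟩) hP'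
        refine ⟨d', ?_, ?_, h3⟩
        · rw [h1]; simp [pvNews]
        · rw [h2]; simp [pvNews]
      · -- all of p's children are fresh
        have hbnd : ((pvH cp).getD p []).Nodup := by
          have h := (pvBucketH_pairwise cp hnd p).imp (fun {a b} h => ne_of_lt h)
          exact h
        have hfr : ∀ c ∈ (pvH cp).getD p [], d.contains c = false := by
          intro c hc
          cases hdc : d.contains c with
          | false => rfl
          | true =>
              exfalso
              rcases (pvContains_iff_mem_fst d c).mp hdc with ⟨e, he, hec⟩
              rw [hmono] at he
              rcases List.mem_append.mp he with he | he
              · have h1 := hfresh p List.mem_cons_self hr c hc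
                have h2 : r.contains c = true := (pvContains_iff_mem_fst r c).mpr ⟨e, he, hec⟩
                rw [h1] at h2; cases h2
              · rcases hΔ e he with ⟨hecp, hep⟩
                have h1 : (c, e.2) ∈ cp := by rw [← hec]; simpa using hecp
                have h2 : (c, p) ∈ cp := (pvBucketH_mem cp p c).mp hc
                have h3 := pvKey_unique cp hnd h1 h2
                exact hep (h3 ▸ List.mem_cons_self)
        rw [hstep, pvInnerFresh p _ nx d hbnd hfr]
        have hItems : (((pvH cp).getD p []).foldl (fun d c => d.insert c p) d).items
            = d.items ++ ((pvH cp).getD p []).map (fun c => (c, p)) := by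
          have h := PySem.Dict.items_foldl_insert_fresh ((pvH cp).getD p []) (fun c => c)
            (fun _ => p) d hfr (by simpa using hbnd)
          simpa using h
        have hknd2 : (((pvH cp).getD p []).foldl (fun d c => d.insert c p) d).keys.Nodup :=
          PySem.Dict.nodup_keys_foldl_insert _ _ _ hknd
        obtain ⟨d', h1, h2, h3⟩ := ih (nx ++ (pvH cp).getD p [])
          (((pvH cp).getD p []).foldl (fun d c => d.insert c p) d)
          (Δacc ++ ((pvH cp).getD p []).map (fun c => (c, p)))
          (by rw [hItems, hmono, List.append_assoc]) hknd2 hstale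
          (fun q hq => hfresh q (List.mem_cons_of_mem _ hq))
          (by
            intro e he
            rcases List.mem_append.mp he with he | he
            · exact ⟨(hΔ e he).1, fun hm => (hΔ e he).2 (List.mem_cons_of_mem _ hm)⟩
            · rcases List.mem_map.mp he with ⟨c, hc, rfl⟩
              exact ⟨(pvBucketH_mem cp p c).mp hc, hpP'⟩)
          hP'
        refine ⟨d', ?_, ?_, h3⟩
        · rw [h1]
          simp [pvNews, hr, List.map_map, Function.comp_def, List.append_assoc]
        · rw [h2, hItems]
          simp [pvNews, hr, List.append_assoc]

lemma pvNewsPairwise (cp : List (String × String)) (root : String) (hnd : (pvKeys cp).Nodup)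
    (k : Nat) :
    ∀ (E : List (String × String)),
    (∀ e ∈ E, e ∈ cp ∧ ∃ t, pvK cp root e.2 = some t ∧ t.length + 1 = k) →
    E.Pairwise (pvKeyLt cp root) →
    (pvNews cp root (E.map Prod.fst)).Pairwise (pvKeyLt cp root) := by
  intro E
  induction E with
  | nil => intro _ _; simp [pvNews]
  | cons e E' ih =>
      intro hE hpw
      rcases List.pairwise_cons.mp hpw with ⟨hhead, hpw'⟩
      have hnews : pvNews cp root ((e :: E').map Prod.fst)
          = (if e.1 = root then [] else ((pvH cp).getD e.1 []).map (fun c => (c, e.1)))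
            ++ pvNews cp root (E'.map Prod.fst) := by
        simp [pvNews]
      rw [hnews]
      rcases hE e List.mem_cons_self with ⟨hecp, t, hKt, hlt⟩
      rw [List.pairwise_append]
      refine ⟨?_, ih (fun e' he' => hE e' (List.mem_cons_of_mem _ he')) hpw', ?_⟩
      · by_cases hr : e.1 = root
        · simp [hr]
        · rw [if_neg hr, List.pairwise_map]
          have hKp : pvK cp root e.1 = some (t ++ [e.1]) := pvK_child cp root hnd hecp hr hKt
          exact (pvBucketH_pairwise cp hnd e.1).imp
            (fun {c1 c2} h => pvKeyLt_same_parent cp root hKp h)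
      · intro a ha b hb
        by_cases hr : e.1 = root
        · rw [if_pos hr] at ha; cases ha
        · rw [if_neg hr] at ha
          rcases List.mem_map.mp ha with ⟨c1, _, rfl⟩
          rcases (pvNews_mem cp root (E'.map Prod.fst) b).mp hb with ⟨hbP, hbnr, hbc⟩
          rcases List.mem_map.mp hbP with ⟨e', he', hbe⟩
          rcases hE e' (List.mem_cons_of_mem _ he') with ⟨he'cp, t', hKt', hlt'⟩
          have hKpa : pvK cp root e.1 = some (t ++ [e.1]) := pvK_child cp root hnd hecp hr hKt
          have hKpb : pvK cp root e'.1 = some (t' ++ [e'.1]) :=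
            pvK_child cp root hnd he'cp (by rw [hbe]; exact hbnr) hKt'
          -- t ++ [e.1] < t' ++ [e'.1] from the key order of e and e'
          have hkey := hhead e' he'
          have hkey' : pvEntKey cp root e < pvEntKey cp root e' := hkey
          rw [pvEntKey_eq cp root hKt, pvEntKey_eq cp root hKt'] at hkey'
          have hlen : (t ++ [e.1]).length = (t' ++ [e'.1]).length := by
            simp; omega
          have hlists : t ++ [e.1] < t' ++ [e'.1] := by
            rcases Prod.Lex.lt_iff.mp hkey' with h | ⟨_, h⟩
            · exfalso
              have h1 : t.length + 1 < t'.length + 1 := h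
              omega
            · rcases Prod.Lex.lt_iff.mp h with h2 | ⟨heq, h3⟩
              · exact h2
              · exfalso
                have heqL : t ++ [e.1] = t' ++ [e'.1] := heq
                have hlent : t.length = t'.length := by omega
                rcases List.append_inj heqL hlent with ⟨_, hsing⟩
                have he1 : e.1 = e'.1 := by simpa using hsing
                rcases Prod.Lex.lt_iff.mp h3 with h4 | ⟨_, h4⟩
                · have h5 : e.1 < e'.1 := h4
                  exact absurd (he1 ▸ h5) (lt_irrefl _)
                · have h5 : e.2 < e'.2 := h4
                  have : e.2 = e'.2 := pvKey_unique cp hnd (by simpa using hecp)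
                    (by rw [he1]; simpa using he'cp)
                  exact absurd (this ▸ h5) (lt_irrefl _)
          have := pvKeyLt_cross cp root hKpa hKpb hlen hlists c1 b.1
          have hb2 : b = (b.1, e'.1) := by rw [hbe]
          rw [hb2]
          exact this

lemma pvLevelStep (cp : List (String × String)) (root : String) (hnd : (pvKeys cp).Nodup)
    (k : Nat) (F : List String) (r : PySem.Dict String String)
    (hInv : pvInv cp root k F r) :
    ∃ Δ d', pvBLevel (pvH cp) F ([], r) = (Δ.map Prod.fst, d') ∧
      d'.items = r.items ++ Δ ∧ pvInv cp root (k + 1) (Δ.map Prod.fst) d' := by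
  obtain ⟨hknd, hsound, hcompl, hpw, hcase⟩ := hInv
  rcases hcase with ⟨hk0, hF, hr⟩ | ⟨hk1, C, E, hCE, hFE, hC, hE⟩
  · -- k = 0 : F = [root], r = empty
    subst hF; subst hr; subst hk0
    have hbnd : ((pvH cp).getD root []).Nodup := by
      have h := (pvBucketH_pairwise cp hnd root).imp (fun {a b} h => ne_of_lt h)
      exact h
    have hfr : ∀ c ∈ (pvH cp).getD root [],
        (PySem.Dict.empty : PySem.Dict String String).contains c = false :=
      fun c _ => PySem.Dict.contains_empty c
    have hlev : pvBLevel (pvH cp) [root] ([], PySem.Dict.empty)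
        = ((pvH cp).getD root [],
           ((pvH cp).getD root []).foldl (fun d c => d.insert c root) PySem.Dict.empty) := by
      simp only [pvBLevel, List.foldl_cons, List.foldl_nil]
      rw [pvInnerFresh root _ [] PySem.Dict.empty hbnd hfr]
      simp
    refine ⟨((pvH cp).getD root []).map (fun c => (c, root)),
      ((pvH cp).getD root []).foldl (fun d c => d.insert c root) PySem.Dict.empty, ?_, ?_, ?_⟩
    · rw [hlev]
      simp [List.map_map, Function.comp_def]
    · have h := PySem.Dict.items_foldl_insert_fresh ((pvH cp).getD root []) (fun c => c)
        (fun _ => root) PySem.Dict.empty hfr (by simpa using hbnd)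
      simpa using h
    · have hitems : (((pvH cp).getD root []).foldl (fun d c => d.insert c root)
          PySem.Dict.empty).items = ((pvH cp).getD root []).map (fun c => (c, root)) := by
        have h := PySem.Dict.items_foldl_insert_fresh ((pvH cp).getD root []) (fun c => c)
          (fun _ => root) PySem.Dict.empty hfr (by simpa using hbnd)
        simpa using h
      have hdep1 : ∀ c ∈ (pvH cp).getD root [],
          pvK cp root root = some [] ∧ (c, root) ∈ cp :=
        fun c hc => ⟨pvK_root cp root, (pvBucketH_mem cp root c).mp hc⟩
      refine ⟨PySem.Dict.nodup_keys_foldl_insert _ _ _ PySem.Dict.nodup_keys_empty, ?_, ?_, ?_, ?_⟩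
      · intro e he
        rw [hitems] at he
        rcases List.mem_map.mp he with ⟨c, hc, rfl⟩
        exact ⟨(hdep1 c hc).2, [], pvK_root cp root, by simp⟩
      · intro e he t ht hlen
        have h0 : t.length = 0 := by omega
        have ht0 : t = [] := List.eq_nil_of_length_eq_zero h0
        subst ht0
        have hre : pvReach cp root e.2 [] := (pvK_iff cp root e.2 []).mp ht
        have he2 : e.2 = root := pvReach_nil hre rfl
        rw [hitems]
        refine List.mem_map.mpr ⟨e.1, ?_, by rw [← he2]⟩
        exact (pvBucketH_mem cp root e.1).mpr (by rw [← he2]; simpa using he)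
      · rw [hitems, List.pairwise_map]
        exact (pvBucketH_pairwise cp hnd root).imp
          (fun {c1 c2} h => pvKeyLt_same_parent cp root (pvK_root cp root) h)
      · refine Or.inr ⟨by omega, [], ((pvH cp).getD root []).map (fun c => (c, root)),
          by rw [hitems]; simp, by simp [List.map_map, Function.comp_def], by simp, ?_⟩
        intro e he
        rcases List.mem_map.mp he with ⟨c, hc, rfl⟩
        exact ⟨[], pvK_root cp root, by simp⟩
  · -- k ≥ 1
    have hEmem : ∀ e ∈ E, e ∈ r.items := by
      intro e he; rw [hCE]; exact List.mem_append.mpr (Or.inr he)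
    have hEcp : ∀ e ∈ E, e ∈ cp := fun e he => (hsound e (hEmem e he)).1
    have hstale : ∀ c ∈ (pvH cp).getD root [], r.contains c = true := by
      intro c hc
      have hccp : (c, root) ∈ cp := (pvBucketH_mem cp root c).mp hc
      have hin : (c, root) ∈ r.items :=
        hcompl (c, root) hccp [] (pvK_root cp root) (by simpa using hk1)
      exact (pvContains_iff_mem_fst r c).mpr ⟨(c, root), hin, rfl⟩
    have hfreshF : ∀ p ∈ F, p ≠ root → ∀ c ∈ (pvH cp).getD p [], r.contains c = false := by
      intro p hp hpr c hc
      rw [hFE] at hp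
      rcases List.mem_map.mp hp with ⟨e0, he0, rfl⟩
      rcases hE e0 he0 with ⟨t0, hK0, hl0⟩
      have hKp : pvK cp root e0.1 = some (t0 ++ [e0.1]) :=
        pvK_child cp root hnd (hEcp e0 he0) hpr hK0
      cases hrc : r.contains c with
      | false => rfl
      | true =>
          exfalso
          rcases (pvContains_iff_mem_fst r c).mp hrc with ⟨e', he', hec⟩
          rcases hsound e' he' with ⟨he'cp, t', hK', hl'⟩
          have h1 : (c, e'.2) ∈ cp := by rw [← hec]; simpa using he'cp
          have h2 : (c, e0.1) ∈ cp := (pvBucketH_mem cp e0.1 c).mp hc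
          have h3 : e'.2 = e0.1 := pvKey_unique cp hnd h1 h2
          rw [h3, hKp] at hK'
          have h4 : t' = t0 ++ [e0.1] := by injection hK' with h; exact h.symm
          have h5 : t'.length = t0.length + 1 := by rw [h4]; simp
          omega
    have hFnd : F.Nodup := by
      have h3 : ((C ++ E).map Prod.fst).Nodup := by
        have h2 : (C ++ E).map Prod.fst = r.keys := by
          rw [← hCE]; simp [PySem.Dict.keys]
        rw [h2]; exact hknd
      rw [List.map_append, List.nodup_append] at h3
      rw [hFE]
      exact h3.2.1
    obtain ⟨d', h1, h2, h3⟩ := pvLevelMid cp root hnd r F [] r [] (by simp) hknd hstale hfreshF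
      (by simp) hFnd
    have hΔdep : ∀ e ∈ pvNews cp root F,
        e ∈ cp ∧ ∃ t, pvK cp root e.2 = some t ∧ t.length + 1 = k + 1 := by
      intro e he
      rcases (pvNews_mem cp root F e).mp he with ⟨heF, henr, hebk⟩
      have hecp : e ∈ cp := by
        have := (pvBucketH_mem cp e.2 e.1).mp hebk
        simpa using this
      rw [hFE] at heF
      rcases List.mem_map.mp heF with ⟨e0, he0, he0e⟩
      rcases hE e0 he0 with ⟨t0, hK0, hl0⟩
      have hKp : pvK cp root e0.1 = some (t0 ++ [e0.1]) :=
        pvK_child cp root hnd (hEcp e0 he0) (by rw [he0e]; exact henr) hK0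
      refine ⟨hecp, t0 ++ [e0.1], by rw [← he0e]; exact hKp, by simp; omega⟩
    refine ⟨pvNews cp root F, d', by rw [h1]; simp, h2, ?_, ?_, ?_, ?_, ?_⟩
    · exact h3
    · intro e he
      rw [h2] at he
      rcases List.mem_append.mp he with he | he
      · rcases hsound e he with ⟨h4, t, h5, h6⟩
        exact ⟨h4, t, h5, by omega⟩
      · rcases hΔdep e he with ⟨h4, t, h5, h6⟩
        exact ⟨h4, t, h5, by omega⟩
    · intro e he t ht hlen
      rw [h2]
      rcases Nat.lt_or_ge (t.length + 1) (k + 1) with hlt | hge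
      · exact List.mem_append.mpr (Or.inl (hcompl e he t ht (by omega)))
      · have hk : t.length = k := by omega
        have hre : pvReach cp root e.2 t := (pvK_iff cp root e.2 t).mp ht
        refine List.mem_append.mpr (Or.inr ?_)
        cases hre with
        | root =>
            exfalso
            simp at hk
            omega
        | step x p' s hne hget hrs =>
            -- the case substitutes x := e.2 and t := s ++ [e.2]
            have hxpcp : (e.2, p') ∈ cp := (pvCP_get?_iff cp hnd e.2 p').mp hget
            have hKs : pvK cp root p' = some s := (pvK_iff cp root p' s).mpr hrs
            have hslen : s.length + 1 = k := by
              have h5 : (s ++ [e.2]).length = k := hk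
              simpa using h5
            have hmemxp : (e.2, p') ∈ r.items := hcompl (e.2, p') hxpcp s hKs (by omega)
            rw [hCE] at hmemxp
            have hxE : (e.2, p') ∈ E := by
              rcases List.mem_append.mp hmemxp with hI | hI
              · exfalso
                rcases hC (e.2, p') hI with ⟨tc, hKc, hlc⟩
                rw [hKs] at hKc
                have h6 : tc = s := by injection hKc with h7; exact h7.symm
                rw [h6] at hlc
                omega
              · exact hI
            have hxF : e.2 ∈ F := by
              rw [hFE]
              exact List.mem_map.mpr ⟨(e.2, p'), hxE, rfl⟩
            refine (pvNews_mem cp root F e).mpr ⟨hxF, hne, ?_⟩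
            refine (pvBucketH_mem cp e.2 e.1).mpr ?_
            simpa using he
    · rw [h2, List.pairwise_append]
      refine ⟨hpw, ?_, ?_⟩
      · have hEpw : E.Pairwise (pvKeyLt cp root) := by
          have := hpw
          rw [hCE, List.pairwise_append] at this
          exact this.2.1
        have hEdep : ∀ e ∈ E, e ∈ cp ∧ ∃ t, pvK cp root e.2 = some t ∧ t.length + 1 = k :=
          fun e he => ⟨hEcp e he, hE e he⟩
        have := pvNewsPairwise cp root hnd k E hEdep hEpw
        rw [← hFE] at this
        exact this
      · intro a ha b hb
        rcases hsound a ha with ⟨_, ta, hKa, hla⟩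
        rcases hΔdep b hb with ⟨_, tb, hKb, hlb⟩
        exact pvKeyLt_of_depth_lt cp root hKa hKb (by omega)
    · refine Or.inr ⟨by omega, r.items, pvNews cp root F, h2, rfl, ?_, ?_⟩
      · intro e he
        rcases hsound e he with ⟨_, t, h5, h6⟩
        exact ⟨t, h5, by omega⟩
      · intro e he
        rcases hΔdep e he with ⟨_, t, h5, h6⟩
        exact ⟨t, h5, h6⟩

-- no entries deeper than an exhausted level
lemma pvNoDeeper (cp : List (String × String)) (root : String) (hnd : (pvKeys cp).Nodup)
    (k : Nat) (hk : 1 ≤ k)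
    (hnone : ∀ e ∈ cp, ∀ t, pvK cp root e.2 = some t → t.length + 1 ≠ k) :
    ∀ d, k ≤ d → ∀ e ∈ cp, ∀ t, pvK cp root e.2 = some t → t.length + 1 ≠ d := by
  intro d hd
  induction d, hd using Nat.le_induction with
  | base => exact hnone
  | succ d hd ihd =>
      intro e he t ht hlen
      have hre : pvReach cp root e.2 t := (pvK_iff cp root e.2 t).mp ht
      cases hre with
      | root => simp at hlen; omega
      | step x p' s hne hget hrs =>
          have hxpcp : (e.2, p') ∈ cp := (pvCP_get?_iff cp hnd e.2 p').mp hget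
          have hKs : pvK cp root p' = some s := (pvK_iff cp root p' s).mpr hrs
          have hslen : s.length + 1 = d := by
            have h5 : (s ++ [e.2]).length + 1 = d + 1 := hlen
            simp at h5
            omega
          exact ihd (e.2, p') hxpcp s hKs hslen

lemma pvFinalNil (cp : List (String × String)) (root : String) (hnd : (pvKeys cp).Nodup)
    (k : Nat) (r : PySem.Dict String String) (hInv : pvInv cp root k [] r) :
    (∀ e, e ∈ r.items ↔ e ∈ cp ∧ ∃ t, pvK cp root e.2 = some t) ∧
    r.items.Pairwise (pvKeyLt cp root) ∧ r.keys.Nodup := by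
  obtain ⟨hknd, hsound, hcompl, hpw, hcase⟩ := hInv
  rcases hcase with ⟨_, hF, _⟩ | ⟨hk1, C, E, hCE, hFE, hC, hE⟩
  · cases hF
  · have hEnil : E = [] := by
      cases E with
      | nil => rfl
      | cons e E' => simp at hFE
    subst hEnil
    rw [List.append_nil] at hCE
    have hnone : ∀ e ∈ cp, ∀ t, pvK cp root e.2 = some t → t.length + 1 ≠ k := by
      intro e he t ht hlen
      have hmem : e ∈ r.items := hcompl e he t ht (by omega)
      rw [hCE] at hmem
      rcases hC e hmem with ⟨tc, hKc, hlc⟩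
      rw [ht] at hKc
      have h6 : tc = t := by injection hKc with h7; exact h7.symm
      rw [h6] at hlc
      omega
    have hdeep := pvNoDeeper cp root hnd k hk1 hnone
    refine ⟨?_, hpw, hknd⟩
    intro e
    constructor
    · intro he
      rcases hsound e he with ⟨h1, t, h2, _⟩
      exact ⟨h1, t, h2⟩
    · rintro ⟨he, t, ht⟩
      rcases Nat.lt_or_ge (t.length + 1) (k + 1) with hlt | hge
      · exact hcompl e he t ht (by omega)
      · exact absurd rfl (hdeep (t.length + 1) (by omega) e he t ht)

lemma pvItemsLen (cp : List (String × String)) (r : PySem.Dict String String)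
    (hknd : r.keys.Nodup) (hsub : ∀ e ∈ r.items, e ∈ cp) : r.items.length ≤ cp.length := by
  have hnd : r.items.Nodup := by
    have h : (r.items.map Prod.fst).Nodup := hknd
    exact h.of_map
  exact (hnd.subperm hsub).length_le

lemma pvLoopFinal (cp : List (String × String)) (root : String) (hnd : (pvKeys cp).Nodup) :
    ∀ (fuel k : Nat) (F : List String) (r : PySem.Dict String String),
    pvInv cp root k F r → cp.length + 2 ≤ r.items.length + fuel →
    (∀ e, e ∈ (pvBLoop (pvH cp) fuel F r).items ↔ e ∈ cp ∧ ∃ t, pvK cp root e.2 = some t) ∧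
    (pvBLoop (pvH cp) fuel F r).items.Pairwise (pvKeyLt cp root) ∧
    (pvBLoop (pvH cp) fuel F r).keys.Nodup := by
  intro fuel
  induction fuel with
  | zero =>
      intro k F r hInv hfu
      exfalso
      have h1 := pvItemsLen cp r hInv.1 (fun e he => (hInv.2.1 e he).1)
      omega
  | succ fuel ih =>
      intro k F r hInv hfu
      by_cases hF : F = []
      · subst hF
        rw [pvBLoop_nil]
        exact pvFinalNil cp root hnd k r hInv
      · obtain ⟨Δ, d', hEq, hItems, hInv'⟩ := pvLevelStep cp root hnd k F r hInv
        have hstep : pvBLoop (pvH cp) (fuel + 1) F r = pvBLoop (pvH cp) fuel (Δ.map Prod.fst) d' := by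
          rw [pvBLoop]
          rw [if_neg (by simpa [List.isEmpty_iff] using hF)]
          rw [hEq]
        rw [hstep]
        by_cases hΔ : Δ = []
        · subst hΔ
          rw [List.map_nil, pvBLoop_nil]
          exact pvFinalNil cp root hnd (k + 1) d' (by simpa using hInv')
        · refine ih (k + 1) (Δ.map Prod.fst) d' hInv' ?_
          have h1 : d'.items.length = r.items.length + Δ.length := by
            rw [hItems, List.length_append]
          have h2 : 1 ≤ Δ.length := List.length_pos_iff.mpr hΔ
          omega

lemma pvRBFinal (cp : List (String × String)) (root : String) (hnd : (pvKeys cp).Nodup) :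
    (∀ e, e ∈ (pvRB cp root).items ↔ e ∈ cp ∧ ∃ t, pvK cp root e.2 = some t) ∧
    (pvRB cp root).items.Pairwise (pvKeyLt cp root) ∧ (pvRB cp root).keys.Nodup := by
  have hInv0 : pvInv cp root 0 [root] PySem.Dict.empty := by
    refine ⟨PySem.Dict.nodup_keys_empty, ?_, ?_, ?_, Or.inl ⟨rfl, rfl, rfl⟩⟩
    · intro e he
      exact absurd he (by
        rw [show (PySem.Dict.empty : PySem.Dict String String).items = [] from rfl]
        simp)
    · intro e _ t _ hlen
      omega
    · rw [show (PySem.Dict.empty : PySem.Dict String String).items = [] from rfl]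
      exact List.Pairwise.nil
  have h := pvLoopFinal cp root hnd (cp.length + 2) 0 [root] PySem.Dict.empty hInv0
    (by rw [show (PySem.Dict.empty : PySem.Dict String String).items = [] from rfl]; simp)
  exact h

-- ---------- B-side characterization ----------

def pvR1 (cp : List (String × String)) (root : String) : List (Nat × List String × String × String) :=
  cp.filterMap (fun kv => (pvK cp root kv.2).map (fun t => (t.length + 1, t ++ [kv.1], kv.1, kv.2)))

def pvR2 (cp : List (String × String)) (root : String) : List (String × String) :=
  cp.filterMap (fun kv => match pvK cp root kv.2 with
    | none => some (kv.2, kv.1) | some _ => none)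

lemma pvBSplit_foldl (cp : List (String × String)) (root : String) :
    ∀ (l : List (String × String)) (a : List (Nat × List String × String × String))
      (b : List (String × String)),
    l.foldl (pvBSplit (pvCP cp) root cp.length) (a, b)
      = (a ++ l.filterMap (fun kv => (pvK cp root kv.2).map
            (fun t => (t.length + 1, t ++ [kv.1], kv.1, kv.2))),
         b ++ l.filterMap (fun kv => match pvK cp root kv.2 with
            | none => some (kv.2, kv.1) | some _ => none)) := by
  intro l
  induction l with
  | nil => intro a b; simp
  | cons kv tl ih =>
      intro a b
      have hpv : pvKeyOf (pvCP cp) root (cp.length + 1) kv.2 [] = pvK cp root kv.2 := rfl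
      cases hk : pvK cp root kv.2 with
      | none =>
          simp only [List.foldl_cons]
          rw [show pvBSplit (pvCP cp) root cp.length (a, b) kv = (a, b ++ [(kv.2, kv.1)]) from by
            simp [pvBSplit, hpv, hk]]
          rw [ih]
          simp [hk]
      | some t =>
          simp only [List.foldl_cons]
          rw [show pvBSplit (pvCP cp) root cp.length (a, b) kv
              = (a ++ [(t.length + 1, t ++ [kv.1], kv.1, kv.2)], b) from by
            simp [pvBSplit, hpv, hk]]
          rw [ih]
          simp [hk]

lemma pvFilterMapNodup {β : Type} (proj : β → String) :
    ∀ (l : List (String × String)) (g : (String × String) → Option β),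
    (l.map Prod.fst).Nodup → (∀ kv x, g kv = some x → proj x = kv.1) →
    (l.filterMap g).Nodup := by
  intro l
  induction l with
  | nil => intro g _ _; simp
  | cons kv tl ih =>
      intro g hnd hg
      rw [List.map_cons, List.nodup_cons] at hnd
      rw [List.filterMap_cons]
      cases hk : g kv with
      | none => exact ih g hnd.2 hg
      | some x =>
          refine List.nodup_cons.mpr ⟨?_, ih g hnd.2 hg⟩
          intro hx
          rcases List.mem_filterMap.mp hx with ⟨kv', hkv', hgkv'⟩
          have h1 : proj x = kv'.1 := hg kv' x hgkv'
          have h2 : proj x = kv.1 := hg kv x hk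
          exact hnd.1 (List.mem_map.mpr ⟨kv', hkv', by rw [← h1, h2]⟩)

-- ===== VERDICT helper: the full equality =====
lemma pvMain (cp : List (String × String)) (root : String) (hnd : (pvKeys cp).Nodup) :
    legacy_order_child_parent cp root = legacy_order_child_parent_alt cp root := by
  obtain ⟨hmem, hpw, hknd⟩ := pvRBFinal cp root hnd
  have hItemsNd : (pvRB cp root).items.Nodup := by
    have h : ((pvRB cp root).items.map Prod.fst).Nodup := hknd
    exact h.of_map
  -- B's two filterMap lists
  have halt : legacy_order_child_parent_alt cp root
      = ((PySem.List.sorted (pvR2 cp root) (fun q => toLex (q.1, q.2)) false).foldl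
          (fun d q => d.insert q.2 q.1)
          ((PySem.List.sorted (pvR1 cp root) pvKeyFn false).foldl
            (fun d e => d.insert e.2.2.1 e.2.2.2) PySem.Dict.empty)).items := by
    show ((PySem.List.sorted (cp.foldl (pvBSplit (pvCP cp) root cp.length) ([], [])).2
          (fun q => toLex (q.1, q.2)) false).foldl (fun d q => d.insert q.2 q.1)
          ((PySem.List.sorted (cp.foldl (pvBSplit (pvCP cp) root cp.length) ([], [])).1
            pvKeyFn false).foldl (fun d e => d.insert e.2.2.1 e.2.2.2) PySem.Dict.empty)).items
        = _
    rw [pvBSplit_foldl cp root cp [] []]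
    rfl
  -- the sorted reach list is exactly the BFS items, tagged
  set m := (pvRB cp root).items.map (pvTag cp root) with hm
  have hmmem : ∀ x, x ∈ m ↔ x ∈ pvR1 cp root := by
    intro x
    rw [hm]
    constructor
    · intro hx
      rcases List.mem_map.mp hx with ⟨e, he, rfl⟩
      rcases (hmem e).mp he with ⟨hecp, t, hKt⟩
      refine List.mem_filterMap.mpr ⟨e, hecp, ?_⟩
      rw [hKt]
      simp [pvTag, hKt]
    · intro hx
      rcases List.mem_filterMap.mp hx with ⟨kv, hkv, hg⟩
      cases hK : pvK cp root kv.2 with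
      | none => rw [hK] at hg; cases hg
      | some t =>
          rw [hK] at hg
          simp only [Option.map_some, Option.some.injEq] at hg
          refine List.mem_map.mpr ⟨kv, (hmem kv).mpr ⟨hkv, t, hK⟩, ?_⟩
          rw [← hg]
          simp [pvTag, hK]
  have hmnd : m.Nodup := hItemsNd.map (pvTag_inj cp root)
  have hR1nd : (pvR1 cp root).Nodup := by
    refine pvFilterMapNodup (fun x => x.2.2.1) cp _ hnd ?_
    intro kv x hg
    cases hK : pvK cp root kv.2 with
    | none => rw [hK] at hg; cases hg
    | some t =>
        rw [hK] at hg
        simp only [Option.map_some, Option.some.injEq] at hg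
        rw [← hg]
  have hperm : m.Perm (pvR1 cp root) := by
    refine List.perm_of_nodup_nodup_toFinset_eq hmnd hR1nd ?_
    ext x
    simp [List.mem_toFinset, hmmem]
  have hmpw : m.Pairwise (fun a b => pvKeyFn a < pvKeyFn b) := by
    rw [hm, List.pairwise_map]
    exact hpw
  have hsorted1 : PySem.List.sorted (pvR1 cp root) pvKeyFn false = m :=
    PySem.List.sorted_eq_of_perm_of_pairwise_lt _ _ _ hperm hmpw
  -- the first fold rebuilds exactly the BFS dict
  have hfresh1 : ∀ e ∈ m,
      (PySem.Dict.empty : PySem.Dict String String).contains e.2.2.1 = false :=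
    fun e _ => PySem.Dict.contains_empty _
  have hnd1 : (m.map (fun e => e.2.2.1)).Nodup := by
    rw [hm, List.map_map]
    have hfn : ((fun (e : Nat × List String × String × String) => e.2.2.1) ∘ pvTag cp root)
        = Prod.fst := by
      funext e
      simp [pvTag_c]
    rw [hfn]
    exact hknd
  have hout : (m.foldl (fun d e => d.insert e.2.2.1 e.2.2.2) PySem.Dict.empty) = pvRB cp root := by
    apply PySem.Dict.ext
    have h := PySem.Dict.items_foldl_insert_fresh m (fun e => e.2.2.1) (fun e => e.2.2.2)
      PySem.Dict.empty hfresh1 hnd1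
    rw [h, hm, List.map_map]
    have hfn : ((fun (e : Nat × List String × String × String) => (e.2.2.1, e.2.2.2))
        ∘ pvTag cp root) = fun e => e := by
      funext e
      show ((pvTag cp root e).2.2.1, (pvTag cp root e).2.2.2) = e
      rw [pvTag_c, pvTag_p]
    rw [hfn]
    simp [PySem.Dict.empty]
  -- the rest list
  set Lf := (pvPairs cp).filter (fun kv => !((pvRB cp root).contains kv.1)) with hLf
  set m2 := Lf.map (fun kv => (kv.2, kv.1)) with hm2
  have hcontains : ∀ kv : String × String, kv ∈ cp →
      ((pvRB cp root).contains kv.1 = true ↔ ∃ t, pvK cp root kv.2 = some t) := by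
    intro kv hkv
    rw [pvContains_iff_mem_fst]
    constructor
    · rintro ⟨e, he, hec⟩
      rcases (hmem e).mp he with ⟨hecp, t, hKt⟩
      have h1 : (kv.1, e.2) ∈ cp := by rw [← hec]; simpa using hecp
      have h2 : e.2 = kv.2 := pvKey_unique cp hnd h1 (by simpa using hkv)
      exact ⟨t, by rw [← h2]; exact hKt⟩
    · rintro ⟨t, ht⟩
      exact ⟨kv, (hmem kv).mpr ⟨hkv, t, ht⟩, rfl⟩
  have hm2mem : ∀ x, x ∈ m2 ↔ x ∈ pvR2 cp root := by
    intro x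
    rw [hm2]
    constructor
    · intro hx
      rcases List.mem_map.mp hx with ⟨kv, hkv, rfl⟩
      have hcp : kv ∈ cp := (pvPairs_perm cp).mem_iff.mp (List.mem_of_mem_filter hkv)
      have hcf : (pvRB cp root).contains kv.1 = false := by
        have := List.of_mem_filter hkv
        simpa using this
      have hnone : pvK cp root kv.2 = none := by
        cases hK : pvK cp root kv.2 with
        | none => rfl
        | some t =>
            have := (hcontains kv hcp).mpr ⟨t, hK⟩
            rw [hcf] at this; cases this
      exact List.mem_filterMap.mpr ⟨kv, hcp, by rw [hnone]⟩
    · intro hx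
      rcases List.mem_filterMap.mp hx with ⟨kv, hkv, hg⟩
      cases hK : pvK cp root kv.2 with
      | some t => rw [hK] at hg; cases hg
      | none =>
          rw [hK] at hg
          have hx2 : x = (kv.2, kv.1) := by injection hg.symm
          have hcf : (pvRB cp root).contains kv.1 = false := by
            cases hc : (pvRB cp root).contains kv.1 with
            | false => rfl
            | true =>
                rcases (hcontains kv hkv).mp hc with ⟨t, ht⟩
                rw [hK] at ht; cases ht
          refine List.mem_map.mpr ⟨kv, List.mem_filter.mpr ⟨?_, by simp [hcf]⟩, hx2.symm⟩
          exact (pvPairs_perm cp).mem_iff.mpr hkv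
  have hpairsnd : ((pvPairs cp).map Prod.fst).Nodup :=
    (((pvPairs_perm cp).map Prod.fst).nodup_iff).mpr hnd
  have hLfnd : Lf.Nodup := by
    have h1 : (pvPairs cp).Nodup := hpairsnd.of_map
    exact h1.sublist List.filter_sublist
  have hm2nd : m2.Nodup := by
    refine hLfnd.map ?_
    intro a b h
    have h1 : a.2 = b.2 := congrArg Prod.fst h
    have h2 : a.1 = b.1 := congrArg Prod.snd h
    exact Prod.ext h2 h1
  have hR2nd : (pvR2 cp root).Nodup := by
    refine pvFilterMapNodup (fun x => x.2) cp _ hnd ?_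
    intro kv x hg
    cases hK : pvK cp root kv.2 with
    | some t => rw [hK] at hg; cases hg
    | none => rw [hK] at hg; injection hg.symm with h; rw [h]
  have hperm2 : m2.Perm (pvR2 cp root) := by
    refine List.perm_of_nodup_nodup_toFinset_eq hm2nd hR2nd ?_
    ext x
    simp [List.mem_toFinset, hm2mem]
  have hm2pw : m2.Pairwise (fun a b => toLex (a.1, a.2) < toLex (b.1, b.2)) := by
    have hple : (pvPairs cp).Pairwise (fun a b => toLex (a.2, a.1) ≤ toLex (b.2, b.1)) := by
      rw [pvSorted2_eq]; exact PySem.List.sorted_pairwise _ _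
    have hLfle : Lf.Pairwise (fun a b => toLex (a.2, a.1) ≤ toLex (b.2, b.1)) :=
      hple.filter _
    have hLflt : Lf.Pairwise (fun a b => toLex (a.2, a.1) < toLex (b.2, b.1)) := by
      have hLfne : Lf.Pairwise (fun a b : String × String => a ≠ b) := hLfnd
      refine (hLfle.and hLfne).imp ?_
      rintro a b ⟨h1, h2⟩
      refine lt_of_le_of_ne h1 ?_
      intro he
      apply h2
      have h3 := toLex_inj.mp he
      have h4 : a.2 = b.2 := congrArg Prod.fst h3
      have h5 : a.1 = b.1 := congrArg Prod.snd h3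
      exact Prod.ext h5 h4
    rw [hm2, List.pairwise_map]
    exact hLflt
  have hsorted2 : PySem.List.sorted (pvR2 cp root) (fun q => toLex (q.1, q.2)) false = m2 :=
    PySem.List.sorted_eq_of_perm_of_pairwise_lt _ _ _ hperm2 hm2pw
  -- the second fold appends Lf to the BFS items
  have hfresh2 : ∀ q ∈ m2, (pvRB cp root).contains q.2 = false := by
    intro q hq
    rw [hm2] at hq
    rcases List.mem_map.mp hq with ⟨kv, hkv, rfl⟩
    have := List.of_mem_filter hkv
    simpa using this
  have hnd2 : (m2.map (fun q => q.2)).Nodup := by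
    rw [hm2, List.map_map]
    have hfn : ((fun (q : String × String) => q.2) ∘ fun kv => (kv.2, kv.1)) = Prod.fst := by
      funext kv; rfl
    rw [hfn]
    exact hpairsnd.sublist (List.filter_sublist.map Prod.fst)
  rw [pvA_items cp root hnd, halt, hsorted1, hsorted2, hout]
  have h := PySem.Dict.items_foldl_insert_fresh m2 (fun q => q.2) (fun q => q.1)
    (pvRB cp root) hfresh2 hnd2
  rw [h, hm2, List.map_map]
  have hfn : ((fun (q : String × String) => (q.2, q.1)) ∘ fun kv => (kv.2, kv.1))
      = fun kv => kv := by
    funext kv; rfl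
  rw [hfn]
  simp only [List.map_id']
  rw [← hLf]

-- ===== VERDICT (by name: the statement is the Claim_ definition above) =====
theorem legacy_order_child_parent_spec : Claim_equal_legacy_order_child_parent := by
  intro cp root _hdom hpre
  unfold Spec_legacy_order_child_parent
  exact pvMain cp root hpre
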